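-- pv_equiv track=rewrite | github.com/reneedw1/CS-131 | color_edge1_helpers.py | levelA
-- ===== SOURCE A (Python) =====
-- def levelB(z_min, z_med, z_max, z_xy):
--     b_1 = z_xy - z_min
--     b_2 = z_xy - z_max
--     if b_1 > 0 and b_2 < 0:
--         return z_xy
--     else:
--         return z_med
--
-- def levelA(z_min, z_med, z_max, z_xy, s_xy, s_max):
--     a_1 = z_med - z_min
--     a_2 = z_med - z_max
--     if a_1 > 0 and a_2 < 0:
--         return levelB(z_min, z_med, z_max, z_xy)
--     else:
--         s_xy += 2
--         if s_xy <= s_max: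
--             return levelA(z_min, z_med, z_max, z_xy, s_xy, s_max)
--         else:
--             return z_xy
-- ===== SOURCE B (Python) =====
-- def levelB(z_min, z_med, z_max, z_xy):
--     b_1 = z_xy - z_min
--     b_2 = z_xy - z_max
--     if b_1 > 0 and b_2 < 0:
--         return z_xy
--     else:
--         return z_med
--
-- def levelA(z_min, z_med, z_max, z_xy, s_xy, s_max):
--     # The recursion's branch test depends only on z_min/z_med/z_max, which never
--     # change across calls, so the loop either takes the levelB branch at once or
--     # counts s_xy up past s_max and returns z_xy.  Closed form, no recursion.
--     if z_min < z_med < z_max: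
--         return levelB(z_min, z_med, z_max, z_xy)
--     return z_xy
-- ===== Notes on version B (the rewrite author's own statement) =====
-- stated objective: simpler
-- what changed: The recursion's branch test only involves z_min/z_med/z_max, which are invariant across calls, so B replaces the unbounded counting recursion with a single non-recursive conditional: return levelB(...) when z_min < z_med < z_max, else z_xy.
-- outside the precondition, e.g. on levelA(0, 0, 0, 5, 0, 1500): A returns 5, B returns 5
import Mathlib
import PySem

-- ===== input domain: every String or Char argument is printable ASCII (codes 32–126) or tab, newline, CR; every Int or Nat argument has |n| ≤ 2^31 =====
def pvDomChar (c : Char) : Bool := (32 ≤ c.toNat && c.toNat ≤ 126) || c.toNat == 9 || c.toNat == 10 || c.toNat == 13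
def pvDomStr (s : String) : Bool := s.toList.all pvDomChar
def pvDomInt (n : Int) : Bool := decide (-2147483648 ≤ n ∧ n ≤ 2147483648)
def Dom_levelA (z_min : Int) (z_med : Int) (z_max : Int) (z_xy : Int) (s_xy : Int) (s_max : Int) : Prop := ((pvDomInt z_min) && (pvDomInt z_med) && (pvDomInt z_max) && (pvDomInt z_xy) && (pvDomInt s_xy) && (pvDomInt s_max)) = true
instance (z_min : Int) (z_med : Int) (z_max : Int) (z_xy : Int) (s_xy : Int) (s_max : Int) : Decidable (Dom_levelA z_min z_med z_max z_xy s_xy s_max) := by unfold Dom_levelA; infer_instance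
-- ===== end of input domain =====

-- B replaces A's counting recursion (whose branch test is invariant across calls) by one
-- non-recursive conditional; objective: simpler. Equality is claimed on Pre_levelA, which
-- keeps the recursion depth below CPython's recursion limit (A raises RecursionError beyond it).

-- ===== PORT A =====
def levelB (z_min : Int) (z_med : Int) (z_max : Int) (z_xy : Int) : Int :=
  let b_1 := z_xy - z_min
  let b_2 := z_xy - z_max
  if b_1 > 0 ∧ b_2 < 0 then z_xy else z_med

def levelA (z_min : Int) (z_med : Int) (z_max : Int) (z_xy : Int) (s_xy : Int) (s_max : Int) : Int :=
  let a_1 := z_med - z_min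
  let a_2 := z_med - z_max
  if a_1 > 0 ∧ a_2 < 0 then
    levelB z_min z_med z_max z_xy
  else
    let s_xy' := s_xy + 2
    if h : s_xy' ≤ s_max then
      levelA z_min z_med z_max z_xy s_xy' s_max
    else
      z_xy
termination_by (s_max - s_xy).toNat
decreasing_by omega

-- ===== PORT B =====
def levelA_alt (z_min : Int) (z_med : Int) (z_max : Int) (z_xy : Int) (s_xy : Int) (s_max : Int) : Int :=
  if z_min < z_med ∧ z_med < z_max then levelB z_min z_med z_max z_xy else z_xy

-- ===== PRECONDITION & SPEC =====
-- Pre_ excludes false-branch inputs with large s_max - s_xy, on which A exceeds CPython's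
-- recursion limit and raises RecursionError; the conservative bound (< 1000, while the real
-- limit sits near 1996) also excludes a thin band of inputs where A still returns (B returns
-- the same value there, e.g. the cited (0, 0, 0, 5, 0, 1500)).
def Pre_levelA (z_min : Int) (z_med : Int) (z_max : Int) (z_xy : Int) (s_xy : Int) (s_max : Int) : Prop :=
  (z_min < z_med ∧ z_med < z_max) ∨ s_max - s_xy < 1000
instance (z_min : Int) (z_med : Int) (z_max : Int) (z_xy : Int) (s_xy : Int) (s_max : Int) : Decidable (Pre_levelA z_min z_med z_max z_xy s_xy s_max) := by unfold Pre_levelA; infer_instance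

def pvWitness_levelA : Int × Int × Int × Int × Int × Int := (0, 1, 2, 5, 0, 3)


def Spec_levelA (z_min : Int) (z_med : Int) (z_max : Int) (z_xy : Int) (s_xy : Int) (s_max : Int) (out : Int) : Prop := out = levelA_alt z_min z_med z_max z_xy s_xy s_max
instance (z_min : Int) (z_med : Int) (z_max : Int) (z_xy : Int) (s_xy : Int) (s_max : Int) (out : Int) : Decidable (Spec_levelA z_min z_med z_max z_xy s_xy s_max out) := by unfold Spec_levelA; infer_instance

-- ===== CLAIM (what is proved, stated in full; the proofs are below) =====
def Claim_equal_levelA : Prop := ∀ (z_min : Int) (z_med : Int) (z_max : Int) (z_xy : Int) (s_xy : Int) (s_max : Int), Dom_levelA z_min z_med z_max z_xy s_xy s_max → Pre_levelA z_min z_med z_max z_xy s_xy s_max → Spec_levelA z_min z_med z_max z_xy s_xy s_max (levelA z_min z_med z_max z_xy s_xy s_max)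

-- ===== LEMMAS AND PROOFS =====

-- A's result in closed form: the branch test is invariant across the recursion,
-- so every unfolding either hits levelB at once or ends in z_xy.
theorem levelA_closed (z_min z_med z_max z_xy s_xy s_max : Int) :
    levelA z_min z_med z_max z_xy s_xy s_max = levelA_alt z_min z_med z_max z_xy s_xy s_max := by
  fun_induction levelA z_min z_med z_max z_xy s_xy s_max with
  | case1 => simp_all [levelA_alt]; omega
  | case2 => simp_all; rfl
  | case3 => simp_all [levelA_alt]; omega

-- ===== VERDICT (by name: the statement is the Claim_ definition above) =====
theorem levelA_spec : Claim_equal_levelA := by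
  intro z_min z_med z_max z_xy s_xy s_max _ _
  unfold Spec_levelA
  exact levelA_closed z_min z_med z_max z_xy s_xy s_max
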